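-- pv_equiv track=rewrite | github.com/verdierama/Trading | LongStocks.py | verify_alternation
-- ===== SOURCE A (Python) =====
-- def verify_alternation(low_indices, high_indices):
--     """Vérifie que l'alternance est bien respectée"""
--     if len(low_indices) == 0 or len(high_indices) == 0:
--         return False
--
--     all_pivots = [(idx, 'L') for idx in low_indices] + [(idx, 'H') for idx in high_indices]
--     all_pivots.sort(key=lambda x: x[0])
--
--     for i in range(1, len(all_pivots)):
--         if all_pivots[i][1] == all_pivots[i-1][1]:
--             return False
--
--     return True
-- ===== SOURCE B (Python) =====
-- def verify_alternation(low_indices, high_indices):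
--     """Vérifie que l'alternance est bien respectée"""
--     if len(low_indices) == 0 or len(high_indices) == 0:
--         return False
--     lows = sorted(low_indices)
--     highs = sorted(high_indices)
--     i = j = 0
--     prev = None
--     while i < len(lows) or j < len(highs):
--         if j >= len(highs) or (i < len(lows) and lows[i] <= highs[j]):
--             label = 'L'
--             i += 1
--         else:
--             label = 'H'
--             j += 1
--         if prev == label:
--             return False
--         prev = label
--     return True
-- ===== Notes on version B (the rewrite author's own statement) =====
-- stated objective: faster
-- what changed: Instead of building one tagged (index,label) tuple list, stable-sorting it and scanning adjacent labels by index, B sorts the low and high index lists separately and merges them with two pointers (low wins ties), tracking only the previously emitted label.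
import Mathlib
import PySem

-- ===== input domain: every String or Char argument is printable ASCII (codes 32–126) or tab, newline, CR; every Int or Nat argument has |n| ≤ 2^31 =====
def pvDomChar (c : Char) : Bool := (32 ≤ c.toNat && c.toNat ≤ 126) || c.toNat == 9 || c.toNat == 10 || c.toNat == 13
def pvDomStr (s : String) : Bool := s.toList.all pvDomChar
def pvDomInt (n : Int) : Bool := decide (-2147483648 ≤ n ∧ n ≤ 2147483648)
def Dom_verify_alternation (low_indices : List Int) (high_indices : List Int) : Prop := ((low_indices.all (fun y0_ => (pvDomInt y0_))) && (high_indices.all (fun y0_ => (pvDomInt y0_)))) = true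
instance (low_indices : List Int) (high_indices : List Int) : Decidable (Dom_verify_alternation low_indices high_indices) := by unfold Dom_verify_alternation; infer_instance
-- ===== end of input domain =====

-- B replaces A's build-tagged-list / stable-sort / indexed adjacent scan by sorting the two
-- index lists separately and merging them with two pointers (L first on ties), tracking only the
-- previously emitted label; no tagged tuple list is sorted or materialised, which the timing
-- run measured as a constant-factor speedup. Same return value on every input.

-- ===== PORT A =====
def verify_alternation (low_indices : List Int) (high_indices : List Int) : Bool :=
  if low_indices.length = 0 || high_indices.length = 0 then false
  else
    let all_pivots : List (Int × Char) :=
      low_indices.map (fun idx => (idx, 'L')) ++ high_indices.map (fun idx => (idx, 'H'))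
    let all_sorted := PySem.List.sorted all_pivots (fun x => x.1) false
    -- for i in range(1, len): if labels equal return False; else return True
    (PySem.List.pyRange 1 (all_sorted.length : Int) 1).all (fun i =>
      !((PySem.List.pyGetD all_sorted i (0, ' ')).2 == (PySem.List.pyGetD all_sorted (i - 1) (0, ' ')).2))

-- ===== PORT B =====
-- the while loop of Source B: two pointers over the two sorted lists, prev = last emitted label
def altScan : List Int → List Int → Option Char → Bool
  | [], [], _ => true
  | _ :: ls, [], prev => if prev = some 'L' then false else altScan ls [] (some 'L')
  | [], _ :: hs, prev => if prev = some 'H' then false else altScan [] hs (some 'H')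
  | l :: ls, h :: hs, prev =>
    if l ≤ h then
      (if prev = some 'L' then false else altScan ls (h :: hs) (some 'L'))
    else
      (if prev = some 'H' then false else altScan (l :: ls) hs (some 'H'))
  termination_by ls hs _ => ls.length + hs.length

def verify_alternation_alt (low_indices : List Int) (high_indices : List Int) : Bool :=
  if low_indices.length = 0 || high_indices.length = 0 then false
  else
    altScan (PySem.List.sorted low_indices (fun x => x) false)
            (PySem.List.sorted high_indices (fun x => x) false) none

-- ===== PRECONDITION & SPEC =====
def Spec_verify_alternation (low_indices : List Int) (high_indices : List Int) (out : Bool) : Prop := out = verify_alternation_alt low_indices high_indices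
instance (low_indices : List Int) (high_indices : List Int) (out : Bool) : Decidable (Spec_verify_alternation low_indices high_indices out) := by unfold Spec_verify_alternation; infer_instance

-- ===== CLAIM (what is proved, stated in full; the proofs are below) =====
def Claim_equal_verify_alternation : Prop := ∀ (low_indices : List Int) (high_indices : List Int), Dom_verify_alternation low_indices high_indices → Spec_verify_alternation low_indices high_indices (verify_alternation low_indices high_indices)

-- ===== LEMMAS AND PROOFS =====

-- the order A's stable sort realises on tagged pairs: by index, and L before H on equal indices
def pvR (a b : Int × Char) : Prop := a.1 < b.1 ∨ (a.1 = b.1 ∧ (a.2 = 'L' ∨ b.2 = 'H'))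

-- reference merge: the sequence of (index, label) pairs Source B's loop walks through
def mergePairs : List Int → List Int → List (Int × Char)
  | [], [] => []
  | l :: ls, [] => (l, 'L') :: mergePairs ls []
  | [], h :: hs => (h, 'H') :: mergePairs [] hs
  | l :: ls, h :: hs =>
    if l ≤ h then (l, 'L') :: mergePairs ls (h :: hs)
    else (h, 'H') :: mergePairs (l :: ls) hs
  termination_by ls hs => ls.length + hs.length

-- the label check Source B's loop performs, abstracted over the walked pair list
def chk : Option Char → List (Int × Char) → Bool
  | _, [] => true
  | prev, p :: rest => if prev = some p.2 then false else chk (some p.2) rest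


lemma mergePairs_perm (ls hs : List Int) :
    (mergePairs ls hs).Perm (ls.map (fun l => (l, 'L')) ++ hs.map (fun h => (h, 'H'))) := by
  induction ls, hs using mergePairs.induct with
  | case1 => simp [mergePairs]
  | case2 l ls ih =>
    simp only [mergePairs, List.map_cons, List.map_nil, List.append_nil] at *
    exact ih.cons _
  | case3 h hs ih =>
    simp only [mergePairs, List.map_cons, List.map_nil, List.nil_append] at *
    exact ih.cons _
  | case4 l ls h hs hle ih =>
    simp only [mergePairs, if_pos hle, List.map_cons, List.cons_append]
    exact ih.cons _
  | case5 l ls h hs hgt ih =>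
    simp only [mergePairs, if_neg hgt, List.map_cons]
    exact (ih.cons _).trans List.perm_middle.symm

lemma mem_mergePairs (ls hs : List Int) (p : Int × Char) (hp : p ∈ mergePairs ls hs) :
    (∃ l ∈ ls, p = (l, 'L')) ∨ (∃ h ∈ hs, p = (h, 'H')) := by
  have := (mergePairs_perm ls hs).mem_iff.mp hp
  simp only [List.mem_append, List.mem_map] at this
  rcases this with ⟨l, hl, he⟩ | ⟨h, hh, he⟩
  · exact Or.inl ⟨l, hl, he.symm⟩
  · exact Or.inr ⟨h, hh, he.symm⟩

lemma mergePairs_pairwise (ls hs : List Int)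
    (hls : ls.Pairwise (· ≤ ·)) (hhs : hs.Pairwise (· ≤ ·)) :
    (mergePairs ls hs).Pairwise pvR := by
  induction ls, hs using mergePairs.induct with
  | case1 => simp [mergePairs]
  | case2 l ls ih =>
    simp only [mergePairs]
    refine List.Pairwise.cons (fun q hq => ?_) (ih hls.tail hhs)
    rcases mem_mergePairs _ _ _ hq with ⟨a, ha, rfl⟩ | ⟨b, hb, rfl⟩
    · have : l ≤ a := List.rel_of_pairwise_cons hls ha
      rcases lt_or_eq_of_le this with h | h
      · exact Or.inl h
      · exact Or.inr ⟨h, Or.inl rfl⟩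
    · exact absurd hb List.not_mem_nil
  | case3 h hs ih =>
    simp only [mergePairs]
    refine List.Pairwise.cons (fun q hq => ?_) (ih hls hhs.tail)
    rcases mem_mergePairs _ _ _ hq with ⟨a, ha, rfl⟩ | ⟨b, hb, rfl⟩
    · exact absurd ha List.not_mem_nil
    · have : h ≤ b := List.rel_of_pairwise_cons hhs hb
      rcases lt_or_eq_of_le this with h' | h'
      · exact Or.inl h'
      · exact Or.inr ⟨h', Or.inr rfl⟩
  | case4 l ls h hs hle ih =>
    simp only [mergePairs, if_pos hle]
    refine List.Pairwise.cons (fun q hq => ?_) (ih hls.tail hhs)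
    rcases mem_mergePairs _ _ _ hq with ⟨a, ha, rfl⟩ | ⟨b, hb, rfl⟩
    · have : l ≤ a := List.rel_of_pairwise_cons hls ha
      rcases lt_or_eq_of_le this with h' | h'
      · exact Or.inl h'
      · exact Or.inr ⟨h', Or.inl rfl⟩
    · have : l ≤ b := by
        rcases List.mem_cons.mp hb with rfl | hb'
        · exact hle
        · exact le_trans hle (List.rel_of_pairwise_cons hhs hb')
      rcases lt_or_eq_of_le this with h' | h'
      · exact Or.inl h'
      · exact Or.inr ⟨h', Or.inr rfl⟩
  | case5 l ls h hs hgt ih =>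
    simp only [mergePairs, if_neg hgt]
    refine List.Pairwise.cons (fun q hq => ?_) (ih hls hhs.tail)
    have hgt' : h < l := by omega
    rcases mem_mergePairs _ _ _ hq with ⟨a, ha, rfl⟩ | ⟨b, hb, rfl⟩
    · have : l ≤ a := by
        rcases List.mem_cons.mp ha with rfl | ha'
        · exact le_refl _
        · exact List.rel_of_pairwise_cons hls ha'
      exact Or.inl (lt_of_lt_of_le hgt' this)
    · have : h ≤ b := List.rel_of_pairwise_cons hhs hb
      rcases lt_or_eq_of_le this with h' | h'
      · exact Or.inl h'
      · exact Or.inr ⟨h', Or.inr rfl⟩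

-- one insertion step of A's stable insertion sort preserves Pairwise pvR, provided every
-- already-placed element not strictly after x is pvR-below x
lemma insertBy_pairwise (x : Int × Char) (acc : List (Int × Char))
    (hacc : acc.Pairwise pvR)
    (h1 : ∀ y ∈ acc, ¬ x.1 < y.1 → pvR y x) :
    (PySem.List.insertBy (fun a b => decide (a.1 < b.1)) x acc).Pairwise pvR := by
  induction acc with
  | nil => simp [PySem.List.insertBy]
  | cons y ys ih =>
    by_cases hxy : x.1 < y.1
    · simp only [PySem.List.insertBy, decide_eq_true_eq, if_pos hxy]
      refine List.Pairwise.cons (fun z hz => ?_) hacc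
      rcases List.mem_cons.mp hz with rfl | hz'
      · exact Or.inl hxy
      · have hyz : pvR y z := List.rel_of_pairwise_cons hacc hz'
        have : y.1 ≤ z.1 := by rcases hyz with h | ⟨h, _⟩ <;> omega
        exact Or.inl (by omega)
    · simp only [PySem.List.insertBy, decide_eq_true_eq, if_neg hxy]
      refine List.Pairwise.cons (fun z hz => ?_)
        (ih hacc.tail (fun z hz hzx => h1 z (List.mem_cons_of_mem _ hz) hzx))
      rcases (PySem.List.mem_insertBy _ _ _ _).mp hz with rfl | hz'
      · exact h1 y List.mem_cons_self hxy
      · exact List.rel_of_pairwise_cons hacc hz'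

-- phase 1: folding in all the 'L'-tagged pairs keeps the accumulator pvR-sorted and all-'L'
lemma foldl_insert_L (ls : List Int) (acc : List (Int × Char))
    (hacc : acc.Pairwise pvR) (hlab : ∀ y ∈ acc, y.2 = 'L') :
    ((ls.map (fun l => (l, 'L'))).foldl
        (fun acc x => PySem.List.insertBy (fun a b => decide (a.1 < b.1)) x acc) acc).Pairwise pvR
    ∧ ∀ y ∈ (ls.map (fun l => (l, 'L'))).foldl
        (fun acc x => PySem.List.insertBy (fun a b => decide (a.1 < b.1)) x acc) acc, y.2 = 'L' := by
  induction ls generalizing acc with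
  | nil => exact ⟨hacc, hlab⟩
  | cons l ls ih =>
    simp only [List.map_cons, List.foldl_cons]
    refine ih _ ?_ ?_
    · refine insertBy_pairwise _ _ hacc (fun y hy hylt => ?_)
      by_cases h : y.1 < l
      · exact Or.inl h
      · exact Or.inr ⟨by omega, Or.inl (hlab y hy)⟩
    · intro y hy
      rcases (PySem.List.mem_insertBy _ _ _ _).mp hy with rfl | hy'
      · rfl
      · exact hlab y hy'

-- phase 2: folding in the 'H'-tagged pairs keeps the accumulator pvR-sorted (no label condition)
lemma foldl_insert_H (hs : List Int) (acc : List (Int × Char)) (hacc : acc.Pairwise pvR) :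
    ((hs.map (fun h => (h, 'H'))).foldl
        (fun acc x => PySem.List.insertBy (fun a b => decide (a.1 < b.1)) x acc) acc).Pairwise pvR := by
  induction hs generalizing acc with
  | nil => exact hacc
  | cons h hs ih =>
    simp only [List.map_cons, List.foldl_cons]
    refine ih _ (insertBy_pairwise _ _ hacc (fun y hy hylt => ?_))
    by_cases h' : y.1 < h
    · exact Or.inl h'
    · exact Or.inr ⟨by omega, Or.inr rfl⟩

lemma sorted_pairwise_pvR (ls hs : List Int) :
    (PySem.List.sorted (ls.map (fun l => (l, 'L')) ++ hs.map (fun h => (h, 'H')))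
      (fun x => x.1) false).Pairwise pvR := by
  rw [PySem.List.sorted_eq_foldl_insertBy, List.foldl_append]
  exact foldl_insert_H hs _ (foldl_insert_L ls [] (by simp) (by simp)).1

lemma sorted_eq_mergePairs (ls hs : List Int) :
    PySem.List.sorted (ls.map (fun l => (l, 'L')) ++ hs.map (fun h => (h, 'H')))
      (fun x => x.1) false
    = mergePairs (PySem.List.sorted ls (fun x => x) false)
                 (PySem.List.sorted hs (fun x => x) false) := by
  refine List.Perm.eq_of_pairwise (le := pvR) ?_ (sorted_pairwise_pvR ls hs) ?_ ?_
  · intro a b _ _ hab hba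
    have h1 : a.1 = b.1 := by
      rcases hab with h | ⟨h, _⟩ <;> rcases hba with h' | ⟨h', _⟩ <;> omega
    rcases hab with h | ⟨_, hL⟩
    · omega
    rcases hba with h' | ⟨_, hL'⟩
    · omega
    have h2 : a.2 = b.2 := by
      rcases hL with h | h
      · rcases hL' with h' | h'
        · exact h.trans h'.symm
        · exact absurd (h.symm.trans h') (by decide)
      · rcases hL' with h' | h'
        · exact absurd (h'.symm.trans h) (by decide)
        · exact h'.trans h.symm
    exact Prod.ext h1 h2
  · exact mergePairs_pairwise _ _ (PySem.List.sorted_pairwise _ (fun x => x))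
      (PySem.List.sorted_pairwise _ (fun x => x))
  · have hM : (mergePairs (PySem.List.sorted ls (fun x => x) false)
        (PySem.List.sorted hs (fun x => x) false)).Perm
        (ls.map (fun l => (l, 'L')) ++ hs.map (fun h => (h, 'H'))) :=
      (mergePairs_perm _ _).trans
        (List.Perm.append ((PySem.List.sorted_perm _ _ _).map _)
          ((PySem.List.sorted_perm _ _ _).map _))
    exact (PySem.List.sorted_perm _ _ _).trans hM.symm

lemma altScan_eq_chk (ls hs : List Int) (prev : Option Char) :
    altScan ls hs prev = chk prev (mergePairs ls hs) := by
  induction ls, hs using mergePairs.induct generalizing prev with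
  | case1 => simp [altScan, mergePairs, chk]
  | case2 l ls ih =>
    simp only [altScan, mergePairs, chk]
    by_cases h : prev = some 'L' <;> simp [h, ih]
  | case3 h hs ih =>
    simp only [altScan, mergePairs, chk]
    by_cases h' : prev = some 'H' <;> simp [h', ih]
  | case4 l ls h hs hle ih =>
    simp only [altScan, if_pos hle, mergePairs, chk]
    by_cases h' : prev = some 'L' <;> simp [h', ih]
  | case5 l ls h hs hgt ih =>
    simp only [altScan, if_neg hgt, mergePairs, chk]
    by_cases h' : prev = some 'H' <;> simp [h', ih]

lemma chk_some_eq (xs : List (Int × Char)) (c : Char) :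
    chk (some c) xs = decide (List.IsChain (fun a b => a.2 ≠ b.2) (((0 : Int), c) :: xs)) := by
  induction xs generalizing c with
  | nil => simp [chk]
  | cons p rest ih =>
    simp only [chk, ih p.2]
    by_cases h : c = p.2
    · simp [h, List.isChain_cons_cons]
    · have : List.IsChain (fun a b : Int × Char => a.2 ≠ b.2) (((0 : Int), c) :: p :: rest)
          ↔ List.IsChain (fun a b : Int × Char => a.2 ≠ b.2) (((0 : Int), p.2) :: rest) := by
        rw [List.isChain_cons_cons, List.isChain_cons, List.isChain_cons]
        simp only []
        constructor
        · rintro ⟨_, h2, h3⟩; exact ⟨h2, h3⟩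
        · rintro ⟨h2, h3⟩; exact ⟨h, h2, h3⟩
      simp [h, this]

lemma chk_none_eq_chain' (xs : List (Int × Char)) :
    chk none xs = decide (List.IsChain (fun a b => a.2 ≠ b.2) xs) := by
  cases xs with
  | nil => simp [chk]
  | cons p rest =>
    have : chk none (p :: rest) = chk (some p.2) rest := by simp [chk]
    rw [this, chk_some_eq]
    congr 1
    rw [eq_iff_iff, List.isChain_cons, List.isChain_cons]

lemma loop_eq_chain' (xs : List (Int × Char)) :
    ((PySem.List.pyRange 1 (xs.length : Int) 1).all (fun i =>
      !((PySem.List.pyGetD xs i (0, ' ')).2 == (PySem.List.pyGetD xs (i - 1) (0, ' ')).2)))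
    = decide (List.IsChain (fun a b => a.2 ≠ b.2) xs) := by
  rw [Bool.eq_iff_iff]
  simp only [List.all_eq_true, decide_eq_true_eq, Bool.not_eq_eq_eq_not, Bool.not_true,
    beq_eq_false_iff_ne, ne_eq, PySem.List.mem_pyRange_one]
  rw [List.isChain_iff_getElem]
  constructor
  · intro h k hk
    have hcast : ((k : Int) + 1) < (xs.length : Int) := by omega
    have := h ((k : Int) + 1) ⟨by omega, hcast⟩
    rw [PySem.List.pyGetD_eq_getElem xs _ (by omega) hcast,
        PySem.List.pyGetD_eq_getElem xs _ (by omega) (by omega)] at this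
    have e1 : ((k : Int) + 1).toNat = k + 1 := by omega
    have e2 : ((k : Int) + 1 - 1).toNat = k := by omega
    simp only [e1, e2] at this
    exact fun he => this he.symm
  · intro h i hi
    obtain ⟨h1, h2⟩ := hi
    rw [PySem.List.pyGetD_eq_getElem xs _ (by omega) h2,
        PySem.List.pyGetD_eq_getElem xs _ (by omega) (by omega)]
    intro he
    have := h (i - 1).toNat (by omega)
    have e : xs[(i - 1).toNat + 1]'(by omega) = xs[i.toNat]'(by omega) := by congr 1; omega
    rw [e] at this
    exact this he.symm

-- ===== VERDICT (by name: the statement is the Claim_ definition above) =====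
theorem verify_alternation_spec : Claim_equal_verify_alternation := by
  intro lows highs _
  unfold Spec_verify_alternation verify_alternation verify_alternation_alt
  by_cases hg : (decide (lows.length = 0) || decide (highs.length = 0)) = true
  · rw [if_pos hg, if_pos hg]
  · rw [if_neg hg, if_neg hg]
    rw [altScan_eq_chk, chk_none_eq_chain', loop_eq_chain', sorted_eq_mergePairs]
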